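-- pv_equiv track=rewrite | github.com/waivek/hateoas | video_stats.py | get_top_unique_indices
-- ===== SOURCE A (Python) =====
-- def get_top_unique_indices(series, threshold=30, n=50):
--     series = list(series.items())
--     stack = [series[0]]
--     for index, int_offset in series[1:]:
--         smallest_difference = min(abs(added_offset-int_offset) for _, added_offset in stack)
--         if smallest_difference > threshold:
--             stack.append((index, int_offset))
--             if len(stack) == n:
--                 break
--     indices_only = [ T[0] for T in stack ]
--     return indices_only
-- ===== SOURCE B (Python) =====
-- def get_top_unique_indices(series, threshold=30, n=50):
--     items = list(series.items())
--     first_index, first_offset = items[0]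
--     result = [first_index]
--     offsets = [first_offset]  # kept sorted
--
--     for index, off in items[1:]:
--         # hand-written bisect_left (stdlib bisect not imported by the original module)
--         lo, hi = 0, len(offsets)
--         while lo < hi:
--             mid = (lo + hi) // 2
--             if offsets[mid] < off:
--                 lo = mid + 1
--             else:
--                 hi = mid
--         # distance to nearest selected offset = nearest sorted neighbor
--         if lo < len(offsets):
--             d = offsets[lo] - off
--             if lo > 0 and off - offsets[lo - 1] < d:
--                 d = off - offsets[lo - 1]
--         else:
--             d = off - offsets[lo - 1]
--         if d > threshold:
--             result.append(index)
--             offsets.insert(lo, off)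
--
--             if len(result) == n:
--                 break
--     return result
-- ===== Notes on version B (the rewrite author's own statement) =====
-- stated objective: faster
-- what changed: B keeps the selected offsets in a sorted list and finds the nearest selected offset by hand-written binary search (bisect_left) plus an insert at the found position, instead of A's scan of the whole stack computing min(abs(...)) for every candidate.
-- outside the precondition, e.g. on get_top_unique_indices({}, 30, 50): A raises IndexError, B raises IndexError
import Mathlib
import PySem

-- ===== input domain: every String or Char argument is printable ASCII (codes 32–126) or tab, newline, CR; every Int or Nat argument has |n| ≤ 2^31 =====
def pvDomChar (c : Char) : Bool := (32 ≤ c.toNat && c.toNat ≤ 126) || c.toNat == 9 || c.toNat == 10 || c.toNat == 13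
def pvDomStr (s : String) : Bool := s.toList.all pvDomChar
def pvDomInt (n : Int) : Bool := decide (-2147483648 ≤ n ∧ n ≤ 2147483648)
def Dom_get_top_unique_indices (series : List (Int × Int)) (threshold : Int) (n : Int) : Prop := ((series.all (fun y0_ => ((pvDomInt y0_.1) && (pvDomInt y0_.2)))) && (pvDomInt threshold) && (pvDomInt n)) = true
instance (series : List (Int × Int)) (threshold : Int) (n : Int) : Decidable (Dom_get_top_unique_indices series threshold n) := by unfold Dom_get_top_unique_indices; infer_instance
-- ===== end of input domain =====

-- B replaces A's full scan of the selected stack by a binary search over a sorted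
-- list of the selected offsets (objective: faster, asymptotically on the inner step).

-- ===== PORT A =====
-- the for-loop over series[1:] with its early break at len(stack) == n
def pvALoop (threshold n : Int) : List (Int × Int) → List (Int × Int) → List (Int × Int)
  | stack, [] => stack
  | stack, (index, off) :: rest =>
    -- smallest_difference = min(abs(added_offset-int_offset) for _, added_offset in stack)
    let sd := (PySem.List.min? (stack.map fun p => |p.2 - off|) (fun y => y)).getD 0
    -- stack is never empty here, so min? is never none; the .getD 0 default is unreachable
    if sd > threshold then
      let stack' := stack ++ [(index, off)]
      if (stack'.length : Int) = n then stack'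
      else pvALoop threshold n stack' rest
    else pvALoop threshold n stack rest

def get_top_unique_indices (series : List (Int × Int)) (threshold : Int) (n : Int) : List Int :=
  let items := (PySem.Dict.ofList series).items   -- list(series.items())
  match items with
  | [] => []   -- series[0] raises IndexError on an empty dict; excluded by Pre_
  | first :: rest => (pvALoop threshold n [first] rest).map Prod.fst

-- ===== PORT B =====
-- _gap(offsets, off, lo): distance to nearest neighbor in sorted offsets
def pvBGap (offsets : List Int) (off : Int) (lo : Nat) : Int :=
  if lo < offsets.length then
    if 0 < lo ∧ off - offsets.getD (lo - 1) 0 < offsets.getD lo 0 - off then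
      off - offsets.getD (lo - 1) 0
    else offsets.getD lo 0 - off
  else off - offsets.getD (lo - 1) 0

-- Source B's hand-written while-loop IS CPython's bisect_left step for step;
-- PySem.List.bisectLeft is that exact loop (lo<hi; mid=(lo+hi)//2; offsets[mid]<off → lo=mid+1 else hi=mid)
def pvBLoop (threshold n : Int) : List Int → List Int → List (Int × Int) → List Int
  | result, _, [] => result
  | result, offsets, (index, off) :: rest =>
    let lo := PySem.List.bisectLeft offsets off
    if pvBGap offsets off lo > threshold then
      let result' := result ++ [index]
      let offsets' := PySem.List.insert offsets (lo : Int) off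
      if (result'.length : Int) = n then result'
      else pvBLoop threshold n result' offsets' rest
    else pvBLoop threshold n result offsets rest

def get_top_unique_indices_alt (series : List (Int × Int)) (threshold : Int) (n : Int) : List Int :=
  let items := (PySem.Dict.ofList series).items
  match items with
  | [] => []   -- items[0] raises IndexError; excluded by Pre_
  | (fi, fo) :: rest => pvBLoop threshold n [fi] [fo] rest

-- ===== PRECONDITION & SPEC =====
-- Pre_ excludes only the empty dict, on which the Python A raises IndexError at series[0]
def Pre_get_top_unique_indices (series : List (Int × Int)) (threshold : Int) (n : Int) : Prop :=
  series ≠ []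
instance (series : List (Int × Int)) (threshold : Int) (n : Int) : Decidable (Pre_get_top_unique_indices series threshold n) := by unfold Pre_get_top_unique_indices; infer_instance

def pvWitness_get_top_unique_indices : (List (Int × Int)) × Int × Int := ([(0, 5), (1, 100)], 30, 50)

def Spec_get_top_unique_indices (series : List (Int × Int)) (threshold : Int) (n : Int) (out : List Int) : Prop := out = get_top_unique_indices_alt series threshold n
instance (series : List (Int × Int)) (threshold : Int) (n : Int) (out : List Int) : Decidable (Spec_get_top_unique_indices series threshold n out) := by unfold Spec_get_top_unique_indices; infer_instance

-- ===== CLAIM (what is proved, stated in full; the proofs are below) =====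
def Claim_equal_get_top_unique_indices : Prop := ∀ (series : List (Int × Int)) (threshold : Int) (n : Int), Dom_get_top_unique_indices series threshold n → Pre_get_top_unique_indices series threshold n → Spec_get_top_unique_indices series threshold n (get_top_unique_indices series threshold n)

-- ===== LEMMAS AND PROOFS =====

-- _gap at the bisect_left position is the minimum |a - off| over a sorted nonempty offsets list
theorem pvBGap_spec (offsets : List Int) (off : Int) (hne : offsets ≠ [])
    (hs : offsets.Pairwise (· ≤ ·)) :
    pvBGap offsets off (PySem.List.bisectLeft offsets off) ∈ offsets.map (fun a => |a - off|) ∧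
    ∀ y ∈ offsets.map (fun a => |a - off|),
      pvBGap offsets off (PySem.List.bisectLeft offsets off) ≤ y := by
  obtain ⟨hle, hlt, hge⟩ := PySem.List.bisectLeft_spec offsets off hs
  set lo := PySem.List.bisectLeft offsets off with hlo
  have hlen : 0 < offsets.length := List.length_pos_of_ne_nil hne
  have hmono : ∀ i j (hi : i < offsets.length) (hj : j < offsets.length), i ≤ j →
      offsets[i] ≤ offsets[j] := by
    intro i j hi hj hij
    rcases Nat.lt_or_ge i j with h | h
    · exact List.pairwise_iff_getElem.mp hs i j hi hj h
    · have : i = j := le_antisymm hij h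
      subst this; exact le_refl _
  have habs : ∀ i (hi : i < offsets.length), i < lo → |offsets[i] - off| = off - offsets[i] := by
    intro i hi h; have := hlt i hi h; rw [abs_of_neg (by omega)]; ring
  have habs' : ∀ i (hi : i < offsets.length), lo ≤ i → |offsets[i] - off| = offsets[i] - off := by
    intro i hi h; have := hge i hi h; rw [abs_of_nonneg (by omega)]
  have hmem : ∀ i (hi : i < offsets.length),
      |offsets[i] - off| ∈ offsets.map (fun a => |a - off|) := by
    intro i hi; exact List.mem_map.mpr ⟨offsets[i], List.getElem_mem hi, rfl⟩
  have hM : ∀ y ∈ offsets.map (fun a => |a - off|),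
      ∃ i, ∃ (hi : i < offsets.length), y = |offsets[i] - off| := by
    intro y hy
    obtain ⟨a, ha, rfl⟩ := List.mem_map.mp hy
    obtain ⟨i, hi, rfl⟩ := List.mem_iff_getElem.mp ha
    exact ⟨i, hi, rfl⟩
  unfold pvBGap
  by_cases h1 : lo < offsets.length
  · rw [if_pos h1]
    have e1 : offsets.getD lo 0 = offsets[lo] := List.getD_eq_getElem _ _ h1
    by_cases h2 : 0 < lo ∧ off - offsets.getD (lo - 1) 0 < offsets.getD lo 0 - off
    · obtain ⟨h2a, h2b⟩ := h2
      have hlred : lo - 1 < offsets.length := by omega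
      have e2 : offsets.getD (lo - 1) 0 = offsets[lo - 1] := List.getD_eq_getElem _ _ hlred
      rw [if_pos ⟨h2a, h2b⟩]
      refine ⟨by rw [e2, ← habs (lo - 1) hlred (by omega)]; exact hmem _ _, ?_⟩
      intro y hy
      obtain ⟨i, hi, rfl⟩ := hM y hy
      rcases Nat.lt_or_ge i lo with h | h
      · rw [habs i hi h, e2]
        have := hmono i (lo - 1) hi hlred (by omega)
        omega
      · rw [habs' i hi h, e2]
        have := hmono lo i h1 hi h
        rw [e1, e2] at h2b
        omega
    · rw [if_neg h2]
      refine ⟨by rw [e1, ← habs' lo h1 (le_refl _)]; exact hmem _ _, ?_⟩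
      intro y hy
      obtain ⟨i, hi, rfl⟩ := hM y hy
      rcases Nat.lt_or_ge i lo with h | h
      · have h2a : 0 < lo := by omega
        have hlred : lo - 1 < offsets.length := by omega
        have e2 : offsets.getD (lo - 1) 0 = offsets[lo - 1] := List.getD_eq_getElem _ _ hlred
        have hnot : ¬ (off - offsets.getD (lo - 1) 0 < offsets.getD lo 0 - off) :=
          fun hcon => h2 ⟨h2a, hcon⟩
        rw [e1, e2] at hnot
        rw [habs i hi h, e1]
        have := hmono i (lo - 1) hi hlred (by omega)
        omega
      · rw [habs' i hi h, e1]
        have := hmono lo i h1 hi h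
        omega
  · rw [if_neg h1]
    have h2a : 0 < lo := by omega
    have hlred : lo - 1 < offsets.length := by omega
    have e2 : offsets.getD (lo - 1) 0 = offsets[lo - 1] := List.getD_eq_getElem _ _ hlred
    refine ⟨by rw [e2, ← habs (lo - 1) hlred (by omega)]; exact hmem _ _, ?_⟩
    intro y hy
    obtain ⟨i, hi, rfl⟩ := hM y hy
    have h : i < lo := by omega
    rw [habs i hi h, e2]
    have := hmono i (lo - 1) hi hlred (by omega)
    omega

-- inserting off at the bisect_left position keeps the offsets list sorted
theorem pvInsert_sorted (offsets : List Int) (off : Int) (hs : offsets.Pairwise (· ≤ ·)) :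
    (PySem.List.insert offsets ((PySem.List.bisectLeft offsets off : Nat) : Int) off).Pairwise
      (· ≤ ·) := by
  obtain ⟨hle, hlt, hge⟩ := PySem.List.bisectLeft_spec offsets off hs
  set lo := PySem.List.bisectLeft offsets off with hlo
  rw [PySem.List.insert_natCast _ _ _ hle]
  rw [List.pairwise_append]
  have htk : ∀ a ∈ offsets.take lo, a < off := by
    intro a ha
    obtain ⟨i, hi, rfl⟩ := List.mem_iff_getElem.mp ha
    rw [List.getElem_take]
    have hil : i < lo := by simp at hi; omega
    exact hlt i (by simp at hi; omega) hil
  have hdr : ∀ b ∈ offsets.drop lo, off ≤ b := by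
    intro b hb
    obtain ⟨j, hj, rfl⟩ := List.mem_iff_getElem.mp hb
    rw [List.getElem_drop]
    have hjl : lo + j < offsets.length := by simp at hj; omega
    exact hge (lo + j) hjl (by omega)
  refine ⟨hs.sublist (List.take_sublist _ _), ?_, ?_⟩
  · rw [List.pairwise_cons]
    exact ⟨hdr, hs.sublist (List.drop_sublist _ _)⟩
  · intro a ha b hb
    have h1 := htk a ha
    rcases List.mem_cons.mp hb with rfl | hb'
    · omega
    · have := hdr b hb'; omega

-- main loop invariant: B's (result, offsets) tracks A's stack
theorem pvLoop_eq (threshold n : Int) (rest : List (Int × Int)) :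
    ∀ (stack : List (Int × Int)) (offsets : List Int), stack ≠ [] →
      offsets.Perm (stack.map Prod.snd) → offsets.Pairwise (· ≤ ·) →
      (pvALoop threshold n stack rest).map Prod.fst =
        pvBLoop threshold n (stack.map Prod.fst) offsets rest := by
  induction rest with
  | nil => intro stack offsets _ _ _; rfl
  | cons p rest ih =>
    obtain ⟨index, off⟩ := p
    intro stack offsets hne hperm hsort
    have hoff_ne : offsets ≠ [] := by
      intro h
      have hl := hperm.length_eq
      rw [h] at hl
      simp at hl
      exact hne (List.eq_nil_of_length_eq_zero hl.symm)
    obtain ⟨hgmem, hgmin⟩ := pvBGap_spec offsets off hoff_ne hsort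
    obtain ⟨hle, _, _⟩ := PySem.List.bisectLeft_spec offsets off hsort
    have hpermM : (offsets.map (fun a => |a - off|)).Perm
        (stack.map (fun p => |p.2 - off|)) := by
      have : stack.map (fun p => |p.2 - off|)
          = (stack.map Prod.snd).map (fun a => |a - off|) := by
        simp [List.map_map]
      rw [this]
      exact hperm.map _
    obtain ⟨m, hm⟩ : ∃ m,
        PySem.List.min? (stack.map fun p => |p.2 - off|) (fun y => y) = some m := by
      cases hmm : PySem.List.min? (stack.map fun p => |p.2 - off|) (fun y => y) with
      | none =>
          exact absurd ((PySem.List.min?_eq_none_iff _ _).mp hmm)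
            (by simpa using hne)
      | some m => exact ⟨m, rfl⟩
    have hsd : m = pvBGap offsets off (PySem.List.bisectLeft offsets off) := by
      have h1 : m ∈ offsets.map (fun a => |a - off|) :=
        hpermM.mem_iff.mpr (PySem.List.min?_mem hm)
      have h2 := hgmin m h1
      have h3 : pvBGap offsets off (PySem.List.bisectLeft offsets off)
          ∈ stack.map (fun p => |p.2 - off|) := hpermM.mem_iff.mp hgmem
      have h4 := PySem.List.min?_isMin hm _ h3
      omega
    simp only [pvALoop, pvBLoop, hm, Option.getD_some]
    rw [hsd]
    by_cases hc : pvBGap offsets off (PySem.List.bisectLeft offsets off) > threshold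
    · rw [if_pos hc, if_pos hc]
      have hlen : ((stack ++ [(index, off)]).length : Int)
          = ((stack.map Prod.fst ++ [index]).length : Int) := by simp
      by_cases hn : ((stack ++ [(index, off)]).length : Int) = n
      · rw [if_pos hn, if_pos (by rw [← hlen]; exact hn)]
        simp
      · rw [if_neg hn, if_neg (by rw [← hlen]; exact hn)]
        have hmapf : (stack ++ [(index, off)]).map Prod.fst
            = stack.map Prod.fst ++ [index] := by simp
        rw [← hmapf]
        apply ih
        · simp
        · rw [PySem.List.insert_natCast _ _ _ hle]
          refine List.Perm.trans List.perm_middle ?_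
          rw [List.take_append_drop]
          refine List.Perm.trans (hperm.cons off) ?_
          simp only [List.map_append, List.map_cons, List.map_nil]
          exact (List.perm_append_singleton _ _).symm
        · exact pvInsert_sorted offsets off hsort
    · rw [if_neg hc, if_neg hc]
      exact ih stack offsets hne hperm hsort

-- ===== VERDICT (by name: the statement is the Claim_ definition above) =====
theorem get_top_unique_indices_spec : Claim_equal_get_top_unique_indices := by
  intro series threshold n _ _
  unfold Spec_get_top_unique_indices
  unfold get_top_unique_indices get_top_unique_indices_alt
  cases h : (PySem.Dict.ofList series).items with
  | nil => rfl
  | cons first rest =>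
    obtain ⟨fi, fo⟩ := first
    simpa using pvLoop_eq threshold n rest [(fi, fo)] [fo] (by simp) (by simp) (by simp)
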